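-- pv_equiv track=rewrite | github.com/cem-yilmaz/GCSearch | backend/core/misc/cw1_submissions/code_efe.py | proximity_search
-- ===== SOURCE A (Python) =====
-- def proximity_search(term1, term2, distance, doc_term_positions, positional_inverted_index):
--     # Initialise a result list
--     results = []
--
--     # Initial check to see if both term 1 and term 2 are in the positional inverted index
--     if term1 in positional_inverted_index and term2 in positional_inverted_index:
--         # Then check if term 2 appears in the same document as term 1
--         for doc_id in positional_inverted_index[term1]:
--             if doc_id in positional_inverted_index[term2]:
--                 # Retrieve their positions
--                 positions_term1 = positional_inverted_index[term1][doc_id]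
--                 positions_term2 = positional_inverted_index[term2][doc_id]
--                 # Check if any positions are within the specified distance
--                 for pos1 in positions_term1:
--                     if any(abs(pos2 - pos1) <= distance for pos2 in positions_term2):
--                         results.append(doc_id)
--                         break
--     # Return the proximity search results
--     return results
-- ===== SOURCE B (Python) =====
-- def _has_close_pair(xs, ys, distance):
--     # linear merge scan over two sorted lists via two index pointers
--     i = 0
--     j = 0
--     while i < len(xs) and j < len(ys):
--         if abs(xs[i] - ys[j]) <= distance:
--             return True
--         if xs[i] < ys[j]:
--             i += 1
--         else:
--             j += 1
--     return False
--
-- def proximity_search(term1, term2, distance, doc_term_positions, positional_inverted_index):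
--     # Build the answer as one comprehension over term1's documents; per document,
--     # sort both position lists and decide existence of a close pair by a linear
--     # merge scan instead of A's nested all-pairs loop.
--     if term1 not in positional_inverted_index or term2 not in positional_inverted_index:
--         return []
--     docs1 = positional_inverted_index[term1]
--     docs2 = positional_inverted_index[term2]
--     return [doc for doc in docs1
--             if doc in docs2
--             and _has_close_pair(sorted(docs1[doc]), sorted(docs2[doc]), distance)]
-- ===== Notes on version B (the rewrite author's own statement) =====
-- stated objective: alternative
-- what changed: replaces the nested all-pairs position scan per document by sorting both position lists and a single two-pointer merge scan, and builds the result as one comprehension instead of an accumulator loop; it trades A's early-exit scan for a worst-case-linear per-document check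
import Mathlib
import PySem

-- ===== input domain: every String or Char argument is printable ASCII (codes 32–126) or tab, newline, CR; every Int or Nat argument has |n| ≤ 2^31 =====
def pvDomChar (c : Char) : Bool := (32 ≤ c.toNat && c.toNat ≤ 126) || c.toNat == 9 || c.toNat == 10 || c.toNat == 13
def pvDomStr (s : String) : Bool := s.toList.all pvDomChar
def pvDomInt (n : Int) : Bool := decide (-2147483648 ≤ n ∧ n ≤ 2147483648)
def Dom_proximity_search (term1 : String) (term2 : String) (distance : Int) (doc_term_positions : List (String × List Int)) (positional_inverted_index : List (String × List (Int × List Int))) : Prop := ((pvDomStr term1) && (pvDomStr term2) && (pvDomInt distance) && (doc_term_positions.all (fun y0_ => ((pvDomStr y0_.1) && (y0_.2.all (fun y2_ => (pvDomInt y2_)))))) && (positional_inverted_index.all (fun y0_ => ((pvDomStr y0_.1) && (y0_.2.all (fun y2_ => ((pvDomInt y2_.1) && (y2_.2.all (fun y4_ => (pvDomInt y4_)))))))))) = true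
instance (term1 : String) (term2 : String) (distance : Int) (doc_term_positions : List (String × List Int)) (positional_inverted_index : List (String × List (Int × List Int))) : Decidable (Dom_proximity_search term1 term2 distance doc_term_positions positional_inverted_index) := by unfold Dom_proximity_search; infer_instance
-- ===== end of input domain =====

-- B replaces A's per-document all-pairs position scan by sorting both position lists
-- and one linear merge scan, and builds the result by a filter/comprehension instead
-- of A's accumulator loop; A = B on every input (both ports are total).

-- ===== PORT A =====
-- `any(abs(pos2 - pos1) <= distance for pos2 in positions_term2)`
def pvAnyClose (dist : Int) (p1 : Int) (ps2 : List Int) : Bool :=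
  ps2.any (fun p2 => decide (|p2 - p1| ≤ dist))

-- `for pos1 in positions_term1: if any(...): append; break`  (returns whether the append fired)
def pvCheckA (dist : Int) (ps2 : List Int) : List Int → Bool
  | [] => false
  | p1 :: rest => if pvAnyClose dist p1 ps2 then true else pvCheckA dist ps2 rest

-- `for doc_id in positional_inverted_index[term1]: …` (d1 = index[term1], d2 = index[term2])
def pvLoopA (d1 d2 : PySem.Dict Int (List Int)) (dist : Int) : List (Int × List Int) → List Int → List Int
  | [], res => res
  | (doc, _) :: rest, res =>
      if d2.contains doc then
        if pvCheckA dist (d2.getD doc []) (d1.getD doc []) then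
          pvLoopA d1 d2 dist rest (res ++ [doc])
        else pvLoopA d1 d2 dist rest res
      else pvLoopA d1 d2 dist rest res

def proximity_search (term1 : String) (term2 : String) (distance : Int) (doc_term_positions : List (String × List Int)) (positional_inverted_index : List (String × List (Int × List Int))) : List Int :=
  if (PySem.Dict.ofList positional_inverted_index).contains term1
      && (PySem.Dict.ofList positional_inverted_index).contains term2 then
    pvLoopA (PySem.Dict.ofList ((PySem.Dict.ofList positional_inverted_index).getD term1 []))
            (PySem.Dict.ofList ((PySem.Dict.ofList positional_inverted_index).getD term2 []))
            distance
            (PySem.Dict.ofList ((PySem.Dict.ofList positional_inverted_index).getD term1 [])).items []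
  else []

-- ===== PORT B =====
-- Source B's `_has_close_pair`: the `while i < len(xs) and j < len(ys)` two-pointer loop.
-- fuel = xs.length + ys.length makes the loop total; each iteration advances i + j
-- by one, so the fuel is never exhausted while the `while` condition holds.
def pvHasClosePair (dist : Int) (xs ys : List Int) (i j : Nat) : Nat → Bool
  | 0 => false
  | fuel + 1 =>
    if i < xs.length ∧ j < ys.length then
      if |xs.getD i 0 - ys.getD j 0| ≤ dist then true
      else if xs.getD i 0 < ys.getD j 0 then pvHasClosePair dist xs ys (i + 1) j fuel
      else pvHasClosePair dist xs ys i (j + 1) fuel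
    else false

-- Source B's comprehension `[doc for doc in docs1 if doc in docs2 and _has_close_pair(...)]`
def proximity_search_alt (term1 : String) (term2 : String) (distance : Int) (doc_term_positions : List (String × List Int)) (positional_inverted_index : List (String × List (Int × List Int))) : List Int :=
  let d := PySem.Dict.ofList positional_inverted_index
  if !(d.contains term1) || !(d.contains term2) then []
  else
    let d1 := PySem.Dict.ofList (d.getD term1 [])
    let d2 := PySem.Dict.ofList (d.getD term2 [])
    (d1.items.filter (fun p =>
        d2.contains p.1 &&
        pvHasClosePair distance
          (PySem.List.sorted (d1.getD p.1 []) (fun x => x) false)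
          (PySem.List.sorted (d2.getD p.1 []) (fun x => x) false)
          0 0 ((d1.getD p.1 []).length + (d2.getD p.1 []).length))).map Prod.fst

-- ===== PRECONDITION & SPEC =====
def Spec_proximity_search (term1 : String) (term2 : String) (distance : Int) (doc_term_positions : List (String × List Int)) (positional_inverted_index : List (String × List (Int × List Int))) (out : List Int) : Prop := out = proximity_search_alt term1 term2 distance doc_term_positions positional_inverted_index
instance (term1 : String) (term2 : String) (distance : Int) (doc_term_positions : List (String × List Int)) (positional_inverted_index : List (String × List (Int × List Int))) (out : List Int) : Decidable (Spec_proximity_search term1 term2 distance doc_term_positions positional_inverted_index out) := by unfold Spec_proximity_search; infer_instance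

-- ===== CLAIM =====
def Claim_equal_proximity_search : Prop := ∀ (term1 : String) (term2 : String) (distance : Int) (doc_term_positions : List (String × List Int)) (positional_inverted_index : List (String × List (Int × List Int))), Dom_proximity_search term1 term2 distance doc_term_positions positional_inverted_index → Spec_proximity_search term1 term2 distance doc_term_positions positional_inverted_index (proximity_search term1 term2 distance doc_term_positions positional_inverted_index)

-- ===== LEMMAS AND PROOFS =====

-- A's position loop decides existence of a close pair.
theorem pvCheckA_iff (dist : Int) (ps2 ps1 : List Int) :
    pvCheckA dist ps2 ps1 = true ↔ ∃ p ∈ ps1, ∃ q ∈ ps2, |q - p| ≤ dist := by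
  induction ps1 with
  | nil => simp [pvCheckA]
  | cons p rest ih =>
      have hstep : pvCheckA dist ps2 (p :: rest)
          = if pvAnyClose dist p ps2 then true else pvCheckA dist ps2 rest := rfl
      rw [hstep]
      by_cases h : pvAnyClose dist p ps2 = true
      · rw [if_pos h]
        have h' : ∃ q ∈ ps2, |q - p| ≤ dist := by
          simpa only [pvAnyClose, List.any_eq_true, decide_eq_true_eq] using h
        refine iff_of_true rfl ?_
        obtain ⟨q, hq, hd⟩ := h'
        exact ⟨p, List.mem_cons_self .., q, hq, hd⟩
      · rw [if_neg h, ih]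
        have h' : ∀ q ∈ ps2, ¬ |q - p| ≤ dist := by
          simpa only [pvAnyClose, List.any_eq_true, decide_eq_true_eq, not_exists, not_and] using h
        constructor
        · rintro ⟨p', hp', q, hq, hd⟩; exact ⟨p', List.mem_cons_of_mem _ hp', q, hq, hd⟩
        · rintro ⟨p', hp', q, hq, hd⟩
          rcases List.mem_cons.1 hp' with rfl | hp'
          · exact absurd hd (h' q hq)
          · exact ⟨p', hp', q, hq, hd⟩

-- B's merge scan decides existence of a close pair on sorted lists.
theorem pvHasClosePair_iff (dist : Int) (xs ys : List Int)
    (hx : xs.Pairwise (· ≤ ·)) (hy : ys.Pairwise (· ≤ ·)) :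
    ∀ (fuel i j : Nat), (xs.length - i) + (ys.length - j) ≤ fuel →
      (pvHasClosePair dist xs ys i j fuel = true ↔ ∃ p ∈ xs.drop i, ∃ q ∈ ys.drop j, |p - q| ≤ dist) := by
  intro fuel
  induction fuel with
  | zero =>
      intro i j hf
      refine iff_of_false Bool.false_ne_true ?_
      rintro ⟨p, hp, q, hq, _⟩
      rw [List.drop_eq_nil_of_le (by omega)] at hp
      simp at hp
  | succ fuel ih =>
      intro i j hf
      have hstep : pvHasClosePair dist xs ys i j (fuel + 1)
          = if i < xs.length ∧ j < ys.length then
              if |xs.getD i 0 - ys.getD j 0| ≤ dist then true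
              else if xs.getD i 0 < ys.getD j 0 then pvHasClosePair dist xs ys (i + 1) j fuel
              else pvHasClosePair dist xs ys i (j + 1) fuel
            else false := rfl
      rw [hstep]
      by_cases h : i < xs.length ∧ j < ys.length
      · rw [if_pos h]
        by_cases hle : |xs.getD i 0 - ys.getD j 0| ≤ dist
        · rw [if_pos hle]
          refine iff_of_true rfl ?_
          refine ⟨xs.getD i 0, ?_, ys.getD j 0, ?_, hle⟩
          · rw [List.drop_eq_getElem_cons h.1, List.getD_eq_getElem _ _ h.1]
            exact List.mem_cons_self ..
          · rw [List.drop_eq_getElem_cons h.2, List.getD_eq_getElem _ _ h.2]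
            exact List.mem_cons_self ..
        · rw [if_neg hle]
          by_cases hlt : xs.getD i 0 < ys.getD j 0
          · rw [if_pos hlt, ih (i + 1) j (by omega)]
            have hxc : xs.drop i = xs.getD i 0 :: xs.drop (i + 1) := by
              rw [List.drop_eq_getElem_cons h.1, List.getD_eq_getElem _ _ h.1]
            have hyhead : ∀ q ∈ ys.drop j, ys.getD j 0 ≤ q := by
              have hp : (ys.drop j).Pairwise (· ≤ ·) := hy.sublist (List.drop_sublist _ _)
              have hyc : ys.drop j = ys.getD j 0 :: ys.drop (j + 1) := by
                rw [List.drop_eq_getElem_cons h.2, List.getD_eq_getElem _ _ h.2]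
              intro q hq
              rw [hyc] at hq hp
              rcases List.mem_cons.1 hq with rfl | hq
              · exact le_refl _
              · exact (List.pairwise_cons.1 hp).1 q hq
            constructor
            · rintro ⟨p, hp, q, hq, hpq⟩
              exact ⟨p, by rw [hxc]; exact List.mem_cons_of_mem _ hp, q, hq, hpq⟩
            · rintro ⟨p, hp, q, hq, hpq⟩
              rw [hxc] at hp
              rcases List.mem_cons.1 hp with rfl | hp
              · exfalso
                have h1 := hyhead q hq
                have h2 : ¬ (ys.getD j 0 - xs.getD i 0) ≤ dist := by
                  intro hc; exact hle (by rw [abs_of_nonpos (by omega)]; omega)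
                have h3 : |xs.getD i 0 - q| = q - xs.getD i 0 := by
                  rw [abs_of_nonpos (by omega)]; omega
                omega
              · exact ⟨p, hp, q, hq, hpq⟩
          · rw [if_neg hlt, ih i (j + 1) (by omega)]
            have hyc : ys.drop j = ys.getD j 0 :: ys.drop (j + 1) := by
              rw [List.drop_eq_getElem_cons h.2, List.getD_eq_getElem _ _ h.2]
            have hxhead : ∀ p ∈ xs.drop i, xs.getD i 0 ≤ p := by
              have hp : (xs.drop i).Pairwise (· ≤ ·) := hx.sublist (List.drop_sublist _ _)
              have hxc : xs.drop i = xs.getD i 0 :: xs.drop (i + 1) := by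
                rw [List.drop_eq_getElem_cons h.1, List.getD_eq_getElem _ _ h.1]
              intro p hpm
              rw [hxc] at hpm hp
              rcases List.mem_cons.1 hpm with rfl | hpm
              · exact le_refl _
              · exact (List.pairwise_cons.1 hp).1 p hpm
            constructor
            · rintro ⟨p, hp, q, hq, hpq⟩
              exact ⟨p, hp, q, by rw [hyc]; exact List.mem_cons_of_mem _ hq, hpq⟩
            · rintro ⟨p, hp, q, hq, hpq⟩
              rw [hyc] at hq
              rcases List.mem_cons.1 hq with rfl | hq
              · exfalso
                have h1 := hxhead p hp
                have h2 : ¬ (xs.getD i 0 - ys.getD j 0) ≤ dist := by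
                  intro hc; exact hle (by rw [abs_of_nonneg (by omega)]; omega)
                have h3 : |p - ys.getD j 0| = p - ys.getD j 0 := abs_of_nonneg (by omega)
                omega
              · exact ⟨p, hp, q, hq, hpq⟩
      · rw [if_neg h]
        refine iff_of_false Bool.false_ne_true ?_
        rintro ⟨p, hp, q, hq, _⟩
        rcases not_and_or.1 h with h' | h'
        · rw [List.drop_eq_nil_of_le (by omega)] at hp; simp at hp
        · rw [List.drop_eq_nil_of_le (by omega)] at hq; simp at hq

-- per document: A's quadratic scan = B's merge check on the sorted lists
theorem check_eq_merge (dist : Int) (ps1 ps2 : List Int) :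
    pvCheckA dist ps2 ps1
      = pvHasClosePair dist (PySem.List.sorted ps1 (fun x => x) false)
                            (PySem.List.sorted ps2 (fun x => x) false) 0 0
                            (ps1.length + ps2.length) := by
  rw [Bool.eq_iff_iff, pvCheckA_iff,
      pvHasClosePair_iff dist _ _ (PySem.List.sorted_pairwise ..) (PySem.List.sorted_pairwise ..)
        (ps1.length + ps2.length) 0 0
        (by rw [PySem.List.length_sorted, PySem.List.length_sorted]; omega)]
  simp only [List.drop_zero, PySem.List.mem_sorted]
  constructor
  · rintro ⟨p, hp, q, hq, hpq⟩; exact ⟨p, hp, q, hq, by rw [abs_sub_comm]; exact hpq⟩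
  · rintro ⟨p, hp, q, hq, hpq⟩; exact ⟨p, hp, q, hq, by rw [abs_sub_comm]; exact hpq⟩

-- A's accumulator loop computes B's filter-then-project comprehension.
theorem loopA_eq_filter (d1 d2 : PySem.Dict Int (List Int)) (dist : Int) :
    ∀ (items : List (Int × List Int)) (res : List Int),
      pvLoopA d1 d2 dist items res
        = res ++ (items.filter (fun p =>
            d2.contains p.1 &&
            pvHasClosePair dist
              (PySem.List.sorted (d1.getD p.1 []) (fun x => x) false)
              (PySem.List.sorted (d2.getD p.1 []) (fun x => x) false)
              0 0 ((d1.getD p.1 []).length + (d2.getD p.1 []).length))).map Prod.fst := by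
  intro items
  induction items with
  | nil => intro res; simp [pvLoopA]
  | cons p rest ih =>
      intro res
      obtain ⟨doc, v⟩ := p
      simp only [pvLoopA, check_eq_merge, List.filter_cons]
      by_cases h2 : d2.contains doc = true
      · by_cases hc : pvHasClosePair dist
            (PySem.List.sorted (d1.getD doc []) (fun x => x) false)
            (PySem.List.sorted (d2.getD doc []) (fun x => x) false)
            0 0 ((d1.getD doc []).length + (d2.getD doc []).length) = true
        · simp [h2, hc, ih]
        · simp [h2, hc, ih]
      · simp [h2, ih]

-- ===== VERDICT (by name: the statement is the Claim_ definition above) =====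
theorem proximity_search_spec : Claim_equal_proximity_search := by
  intro term1 term2 distance dtp idx _
  unfold Spec_proximity_search proximity_search proximity_search_alt
  by_cases h1 : (PySem.Dict.ofList idx).contains term1 = true <;>
    by_cases h2 : (PySem.Dict.ofList idx).contains term2 = true <;>
      simp [h1, h2, loopA_eq_filter]
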